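-- pv_equiv track=rewrite | github.com/Terobyte/tero2 | tests/test_bugs_open_audit6.py | _source_reraises_provider_errors
-- ===== SOURCE A (Python) =====
-- def _source_reraises_provider_errors(src: str) -> bool:
--     """True when the source contains an explicit re-raise of
--     ProviderError/RateLimitError before the blanket except Exception."""
--     lines = src.splitlines()
--     for i, line in enumerate(lines):
--         stripped = line.strip()
--         if stripped.startswith("except") and "Exception" in stripped and (
--             "ProviderError" not in stripped
--             and "RateLimitError" not in stripped
--         ):
--             # look backwards for an explicit ProviderError/RateLimitError handler
--             window = "\n".join(lines[max(0, i - 10):i])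
--             if ("ProviderError" in window or "RateLimitError" in window) and "raise" in window:
--                 return True
--     return False
-- ===== SOURCE B (Python) =====
-- def _source_reraises_provider_errors(src: str) -> bool:
--     """True when the source contains an explicit re-raise of
--     ProviderError/RateLimitError before the blanket except Exception."""
--     last_provider = -11  # latest line index mentioning ProviderError/RateLimitError
--     last_raise = -11     # latest line index containing "raise"
--     for i, line in enumerate(src.splitlines()):
--         stripped = line.strip()
--         if (stripped.startswith("except") and "Exception" in stripped
--                 and "ProviderError" not in stripped
--                 and "RateLimitError" not in stripped
--                 and last_provider >= i - 10 and last_raise >= i - 10):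
--             return True
--         if "ProviderError" in line or "RateLimitError" in line:
--             last_provider = i
--         if "raise" in line:
--             last_raise = i
--     return False
-- ===== Notes on version B (the rewrite author's own statement) =====
-- stated objective: alternative
-- what changed: Instead of rebuilding and re-scanning a joined 10-line window at every blanket-except line, B keeps two running integers (last line index mentioning ProviderError/RateLimitError, last line index containing 'raise'), updated after the check, and compares them with i-10.
import Mathlib
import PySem

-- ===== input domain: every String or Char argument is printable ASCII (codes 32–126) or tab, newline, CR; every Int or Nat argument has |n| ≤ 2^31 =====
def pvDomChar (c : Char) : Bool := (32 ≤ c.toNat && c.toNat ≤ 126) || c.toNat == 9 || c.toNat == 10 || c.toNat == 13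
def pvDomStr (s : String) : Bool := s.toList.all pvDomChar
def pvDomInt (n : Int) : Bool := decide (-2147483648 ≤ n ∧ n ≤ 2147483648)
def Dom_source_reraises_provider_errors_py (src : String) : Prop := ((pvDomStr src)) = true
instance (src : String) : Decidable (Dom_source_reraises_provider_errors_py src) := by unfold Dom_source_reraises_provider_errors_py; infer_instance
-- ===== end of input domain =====

-- B replaces A's per-except-line rebuild and rescan of the joined 10-line window by two
-- maintained last-seen line indices, a single pass over the lines (objective: alternative).

-- ===== PORT A =====
-- the blanket-except test on the stripped line (shared syntactic guard of both Pythons)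
def pvExceptGuard (stripped : String) : Bool :=
  PySem.Str.startswith stripped "except" && PySem.Str.isIn "Exception" stripped &&
    (!PySem.Str.isIn "ProviderError" stripped && !PySem.Str.isIn "RateLimitError" stripped)

-- 'for i, line in enumerate(lines): …' as index recursion (the body reads lines[max(0,i-10):i])
def pvALoop (lines : List String) (i : Nat) : Bool :=
  if h : i < lines.length then
    let line := lines[i]
    let stripped := PySem.Str.strip line
    if pvExceptGuard stripped then
      let window := PySem.Str.join "\n" (PySem.List.slice lines (some (max 0 ((i : Int) - 10))) (some (i : Int)))
      if (PySem.Str.isIn "ProviderError" window || PySem.Str.isIn "RateLimitError" window)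
          && PySem.Str.isIn "raise" window then true
      else pvALoop lines (i + 1)
    else pvALoop lines (i + 1)
  else false
termination_by lines.length - i

def source_reraises_provider_errors_py (src : String) : Bool :=
  pvALoop (PySem.Str.splitlines src) 0

-- ===== PORT B =====
-- one pass, carrying i and the two last-seen indices (sentinel -11, as in Source B)
def pvBLoop : List String → Int → Int → Int → Bool
  | [], _, _, _ => false
  | line :: rest, i, lastProv, lastRaise =>
    let stripped := PySem.Str.strip line
    if pvExceptGuard stripped && decide (i - 10 ≤ lastProv) && decide (i - 10 ≤ lastRaise) then
      true
    else
      pvBLoop rest (i + 1)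
        (if PySem.Str.isIn "ProviderError" line || PySem.Str.isIn "RateLimitError" line then i else lastProv)
        (if PySem.Str.isIn "raise" line then i else lastRaise)

def source_reraises_provider_errors_py_alt (src : String) : Bool :=
  pvBLoop (PySem.Str.splitlines src) 0 (-11) (-11)

-- ===== PRECONDITION & SPEC =====
def Spec_source_reraises_provider_errors_py (src : String) (out : Bool) : Prop := out = source_reraises_provider_errors_py_alt src
instance (src : String) (out : Bool) : Decidable (Spec_source_reraises_provider_errors_py src out) := by unfold Spec_source_reraises_provider_errors_py; infer_instance

-- ===== CLAIM (what is proved, stated in full; the proofs are below) =====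
def Claim_equal_source_reraises_provider_errors_py : Prop := ∀ (src : String), Dom_source_reraises_provider_errors_py src → Spec_source_reraises_provider_errors_py src (source_reraises_provider_errors_py src)

-- ===== LEMMAS AND PROOFS =====

-- an occurrence of sub (not containing c) in x ++ c :: z lies wholly in x or wholly in z
lemma infix_append_cons_iff {α : Type} (c : α) (sub x z : List α) (hc : c ∉ sub) :
    sub <:+: (x ++ c :: z) ↔ sub <:+: x ∨ sub <:+: z := by
  constructor
  · rintro ⟨s, t, e⟩
    by_cases h1 : s.length + sub.length ≤ x.length
    · -- wholly inside x
      left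
      have hpre : sub <+: x.drop s.length ++ c :: z := by
        refine ⟨t, ?_⟩
        have hd : (x ++ c :: z).drop s.length = x.drop s.length ++ c :: z := by
          rw [List.drop_append_of_le_length (by omega)]
        have hd2 : (s ++ sub ++ t).drop s.length = sub ++ t := by simp
        rw [← hd, ← e, hd2]
      have hlen : sub.length ≤ (x.drop s.length).length := by
        simp; omega
      have heq : sub = (x.drop s.length ++ c :: z).take sub.length :=
        List.prefix_iff_eq_take.mp hpre
      rw [List.take_append_of_le_length hlen] at heq
      rw [heq]
      exact ((x.drop s.length).take_prefix sub.length).isInfix.trans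
        (x.drop_suffix s.length).isInfix
    · by_cases h2 : x.length < s.length
      · -- wholly inside z
        right
        have hd : z = s.drop (x.length + 1) ++ sub ++ t := by
          have h3 : (x ++ c :: z).drop (x.length + 1) = z := by
            have hl : x.length + 1 = (x ++ [c]).length := by simp
            rw [show x ++ c :: z = (x ++ [c]) ++ z by simp, hl, List.drop_left]
          have h4 : (s ++ sub ++ t).drop (x.length + 1)
              = s.drop (x.length + 1) ++ sub ++ t := by
            rw [List.drop_append_of_le_length (l₁ := s ++ sub) (by simp; omega),
                List.drop_append_of_le_length (by omega)]
          rw [← h3, ← e, h4]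
        exact ⟨_, _, hd.symm⟩
      · -- the occurrence would straddle c : impossible, c ∉ sub
        exfalso
        have hlen : x.length < (x ++ c :: z).length := by simp
        have h3 : (x ++ c :: z)[x.length]'hlen = c := by
          rw [List.getElem_append_right (le_refl _)]
          simp
        have hlen2 : x.length < (s ++ sub ++ t).length := by rw [e]; simp
        have h4 : (s ++ sub ++ t)[x.length]'hlen2 = sub[x.length - s.length]'(by omega) := by
          rw [List.getElem_append_left (by simp; omega)]
          rw [List.getElem_append_right (by omega)]
        have hm : sub[x.length - s.length]'(by omega) ∈ sub := List.getElem_mem _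
        rw [← h4] at hm
        have he : (s ++ sub ++ t)[x.length]'hlen2 = c := by
          simp only [e]; exact h3
        rw [he] at hm
        exact hc hm
  · rintro (⟨s, t, e⟩ | ⟨s, t, e⟩)
    · exact ⟨s, t ++ c :: z, by rw [← e]; simp⟩
    · exact ⟨x ++ c :: s, t, by rw [← e]; simp⟩

-- substring search in a '\n'-join is a per-line search, for a nonempty pattern without '\n'
lemma isIn_join (sub : List Char) (hc : ('\n' : Char) ∉ sub) (hne : sub ≠ []) :
    ∀ xs : List (List Char),
      PySem.Chars.isIn sub (PySem.Chars.join ['\n'] xs) = xs.any (fun l => PySem.Chars.isIn sub l)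
  | [] => by
      rw [PySem.Chars.join_nil, List.any_nil, ← Bool.not_eq_true, PySem.Chars.isIn_iff_infix,
        List.infix_nil]
      exact hne
  | [x] => by
      rw [PySem.Chars.join_singleton, List.any_cons, List.any_nil, Bool.or_false]
  | x :: y :: rest => by
      have ih := isIn_join sub hc hne (y :: rest)
      rw [PySem.Chars.join_cons_cons,
        show x ++ ['\n'] ++ PySem.Chars.join ['\n'] (y :: rest)
            = x ++ '\n' :: PySem.Chars.join ['\n'] (y :: rest) by simp,
        Bool.eq_iff_iff, PySem.Chars.isIn_iff_infix, infix_append_cons_iff _ _ _ _ hc,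
        List.any_cons, Bool.or_eq_true, ← PySem.Chars.isIn_iff_infix,
        ← PySem.Chars.isIn_iff_infix, ih]

-- the last index j < i with p lines[j] (sentinel -11), as Source B maintains it
def pvLast (p : String → Bool) (lines : List String) (i : Nat) : Int :=
  (List.range i).foldl (fun acc j => if p (lines.getD j "") then (j : Int) else acc) (-11)

lemma pvLast_succ (p : String → Bool) (lines : List String) (i : Nat) :
    pvLast p lines (i + 1) = if p (lines.getD i "") then (i : Int) else pvLast p lines i := by
  unfold pvLast
  rw [List.range_succ, List.foldl_append]
  simp

-- i-10 ≤ pvLast … i  ↔  some line in the window [i-10, i) satisfies p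
lemma pvLast_ge_iff (p : String → Bool) (lines : List String) (i : Nat) (t : Int) (ht : -11 < t) :
    (t ≤ pvLast p lines i) ↔ ∃ j : Nat, t ≤ (j : Int) ∧ j < i ∧ p (lines.getD j "") = true := by
  induction i with
  | zero =>
      unfold pvLast
      simp only [List.range_zero, List.foldl_nil]
      constructor
      · intro h; omega
      · rintro ⟨j, _, hj, _⟩; omega
  | succ i ih =>
      rw [pvLast_succ]
      split_ifs with hp
      · constructor
        · intro h; exact ⟨i, h, by omega, hp⟩
        · rintro ⟨j, h1, h2, _⟩; omega
      · rw [ih]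
        constructor
        · rintro ⟨j, h1, h2, h3⟩; exact ⟨j, h1, by omega, h3⟩
        · rintro ⟨j, h1, h2, h3⟩
          refine ⟨j, h1, ?_, h3⟩
          rcases Nat.lt_succ_iff_lt_or_eq.mp h2 with h | h
          · exact h
          · subst h; exact absurd h3 hp

-- A's window test for pattern sub equals "some line of the slice contains sub"
lemma window_any (sub : String) (hc : ('\n' : Char) ∉ sub.toList) (hne : sub.toList ≠ [])
    (lines : List String) (i : Nat) :
    PySem.Str.isIn sub (PySem.Str.join "\n" (PySem.List.slice lines (some (max 0 ((i : Int) - 10))) (some (i : Int))))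
      = (PySem.List.slice lines (some (max 0 ((i : Int) - 10))) (some (i : Int))).any (fun l => PySem.Str.isIn sub l) := by
  rw [PySem.Str.isIn_eq, PySem.Str.toList_join,
    show ("\n" : String).toList = ['\n'] from rfl,
    isIn_join sub.toList hc hne, List.any_map]
  rfl

-- membership in the window slice = an index j with i-10 ≤ j < i
lemma slice_any_iff (p : String → Bool) (lines : List String) (i : Nat) (hi : i ≤ lines.length) :
    (PySem.List.slice lines (some (max 0 ((i : Int) - 10))) (some (i : Int))).any p = true
      ↔ ∃ j : Nat, (i : Int) - 10 ≤ (j : Int) ∧ j < i ∧ p (lines.getD j "") = true := by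
  rw [PySem.List.slice_toNat _ (le_max_left _ _) (Int.natCast_nonneg i)]
  have ha : (max 0 ((i : Int) - 10)).toNat = i - 10 := by omega
  have hb : ((i : Int)).toNat = i := by omega
  rw [ha, hb, List.any_eq_true]
  constructor
  · rintro ⟨x, hx, hpx⟩
    rcases List.mem_iff_getElem.mp hx with ⟨m, hm, he⟩
    have hm' : m < i - (i - 10) ∧ i - 10 + m < lines.length := by
      have h1 := hm
      simp only [List.length_take, List.length_drop] at h1
      omega
    refine ⟨i - 10 + m, by omega, by omega, ?_⟩
    have he2 : x = lines[i - 10 + m]'(by omega) := by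
      rw [← he, List.getElem_take, List.getElem_drop]
    rw [List.getD_eq_getElem _ _ (by omega), ← he2]
    exact hpx
  · rintro ⟨j, h1, h2, h3⟩
    have hj : j < lines.length := by omega
    refine ⟨lines[j], ?_, ?_⟩
    · apply List.mem_iff_getElem.mpr
      refine ⟨j - (i - 10), ?_, ?_⟩
      · simp only [List.length_take, List.length_drop]; omega
      · rw [List.getElem_take, List.getElem_drop]
        congr 1
        omega
    · rw [List.getD_eq_getElem _ _ hj] at h3
      exact h3

def pvProv (l : String) : Bool :=
  PySem.Str.isIn "ProviderError" l || PySem.Str.isIn "RateLimitError" l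

def pvRaise (l : String) : Bool := PySem.Str.isIn "raise" l

-- A's combined window hit at line i equals B's two last-index comparisons
lemma window_eq_last (lines : List String) (i : Nat) (hi : i ≤ lines.length) :
    ((PySem.Str.isIn "ProviderError" (PySem.Str.join "\n" (PySem.List.slice lines (some (max 0 ((i : Int) - 10))) (some (i : Int))))
        || PySem.Str.isIn "RateLimitError" (PySem.Str.join "\n" (PySem.List.slice lines (some (max 0 ((i : Int) - 10))) (some (i : Int)))))
      && PySem.Str.isIn "raise" (PySem.Str.join "\n" (PySem.List.slice lines (some (max 0 ((i : Int) - 10))) (some (i : Int)))))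
    = (decide ((i : Int) - 10 ≤ pvLast pvProv lines i) && decide ((i : Int) - 10 ≤ pvLast pvRaise lines i)) := by
  have hP := window_any "ProviderError" (by decide) (by decide) lines i
  have hR := window_any "RateLimitError" (by decide) (by decide) lines i
  have hr := window_any "raise" (by decide) (by decide) lines i
  rw [hP, hR, hr, Bool.eq_iff_iff, Bool.and_eq_true, Bool.and_eq_true, Bool.or_eq_true]
  rw [slice_any_iff (fun l => PySem.Str.isIn "ProviderError" l) lines i hi,
    slice_any_iff (fun l => PySem.Str.isIn "RateLimitError" l) lines i hi,
    slice_any_iff (fun l => PySem.Str.isIn "raise" l) lines i hi,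
    decide_eq_true_iff, decide_eq_true_iff,
    pvLast_ge_iff pvProv lines i _ (by omega), pvLast_ge_iff pvRaise lines i _ (by omega)]
  simp only [pvProv, pvRaise, Bool.or_eq_true]
  constructor
  · rintro ⟨⟨j, a, b, c⟩ | ⟨j, a, b, c⟩, hraise⟩
    · exact ⟨⟨j, a, b, Or.inl c⟩, hraise⟩
    · exact ⟨⟨j, a, b, Or.inr c⟩, hraise⟩
  · rintro ⟨⟨j, a, b, c | c⟩, hraise⟩
    · exact ⟨Or.inl ⟨j, a, b, c⟩, hraise⟩
    · exact ⟨Or.inr ⟨j, a, b, c⟩, hraise⟩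

lemma loop_eq (lines : List String) (i : Nat) :
    pvALoop lines i
      = pvBLoop (lines.drop i) i (pvLast pvProv lines i) (pvLast pvRaise lines i) := by
  rw [pvALoop]
  by_cases h : i < lines.length
  · rw [dif_pos h]
    have hd : lines.drop i = lines[i] :: lines.drop (i + 1) :=
      List.drop_eq_getElem_cons h
    rw [hd, pvBLoop]
    have hW := window_eq_last lines i (le_of_lt h)
    have hg : lines.getD i "" = lines[i] := List.getD_eq_getElem _ _ h
    have ih := loop_eq lines (i + 1)
    have tail : pvBLoop (List.drop (i + 1) lines) ((i : Int) + 1)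
        (if (PySem.Str.isIn "ProviderError" lines[i] || PySem.Str.isIn "RateLimitError" lines[i]) = true
          then (i : Int) else pvLast pvProv lines i)
        (if PySem.Str.isIn "raise" lines[i] = true then (i : Int) else pvLast pvRaise lines i)
        = pvALoop lines (i + 1) := by
      have hcast : ((i : Int) + 1) = ((i + 1 : Nat) : Int) := by push_cast; ring
      rw [hcast, ih, pvLast_succ, pvLast_succ, hg]
      simp only [pvProv, pvRaise]
      rfl
    cases hG : pvExceptGuard (PySem.Str.strip lines[i]) with
    | false =>
        simp only [hG, Bool.false_and, Bool.false_eq_true, if_false]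
        exact tail.symm
    | true =>
        simp only [hG, Bool.true_and]
        rw [hW]
        cases hc : (decide ((i : Int) - 10 ≤ pvLast pvProv lines i)
            && decide ((i : Int) - 10 ≤ pvLast pvRaise lines i)) with
        | true => simp
        | false =>
            simp only [Bool.false_eq_true, if_false]
            exact tail.symm
  · rw [dif_neg h]
    rw [List.drop_eq_nil_of_le (by omega), pvBLoop]
termination_by lines.length - i
decreasing_by omega

-- ===== VERDICT (by name: the statement is the Claim_ definition above) =====
theorem source_reraises_provider_errors_py_spec : Claim_equal_source_reraises_provider_errors_py := by
  intro src _
  unfold Spec_source_reraises_provider_errors_py source_reraises_provider_errors_py source_reraises_provider_errors_py_alt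
  have h := loop_eq (PySem.Str.splitlines src) 0
  simpa [pvLast] using h
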